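-- pv_equiv track=rewrite | github.com/WhiskeyCoder/Gilfoyle_Vs_Dinesh | GilfoyleVsDinesh.py | _generate_topic_context
-- ===== SOURCE A (Python) =====
-- def _generate_topic_context(topic: str) -> str:
--     """Generate context for the conversation based on topic"""
--     tech_contexts = {
--         "ai": "The conversation is about AI and machine learning. Dinesh probably overcomplicated a simple model, while Gilfoyle believes most AI is just if-statements with marketing. Technical topics include neural networks, training data quality, and the real cybersecurity implications.",
--         "blockchain": "The conversation is about blockchain technology. Dinesh likely sees it as the future, while Gilfoyle has probably built his own cryptocurrency mining setup and has cynical views about crypto hype. Technical topics include consensus algorithms, mining inefficiencies, and blockchain security.",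
--         "frontend": "The conversation is about frontend development. Dinesh probably prefers modern frameworks while Gilfoyle thinks most of it is bloated. Technical topics include JavaScript frameworks, rendering performance, and CSS architecture.",
--         "security": "The conversation is about cybersecurity. Gilfoyle is clearly the expert here but Dinesh thinks he knows something about it too. Technical topics include zero-day exploits, penetration testing, and security architecture flaws.",
--         "middleware": "The conversation is about middleware optimization. Dinesh thinks it's a game-changer while Gilfoyle sees it as unnecessary complexity. Technical topics include async processing, caching strategies, and system architecture.",
--         "microservices": "The conversation is about microservices architecture. Dinesh loves the modularity while Gilfoyle thinks it's overcomplicated. Technical topics include service discovery, containerization, and API design.",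
--         "kubernetes": "The conversation is about container orchestration with Kubernetes vs alternatives. Dinesh is excited about it while Gilfoyle thinks it's overkill. Technical topics include deployment strategies, service meshes, and configuration management.",
--         "serverless": "The conversation is about serverless computing. Dinesh thinks it's the future while Gilfoyle sees security holes everywhere. Technical topics include function scaling, cold starts, and vendor lock-in.",
--         "graphql": "The conversation is about GraphQL vs REST APIs. Dinesh loves the query flexibility while Gilfoyle is concerned about performance implications. Technical topics include schema design, caching strategies, and client implementation.",
--         "cloud": "The conversation is about cloud infrastructure. Dinesh wants to go all-in while Gilfoyle prefers on-premise control. Technical topics include cost optimization, multi-cloud strategies, and security concerns.",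
--         "devops": "The conversation is about DevOps practices. Dinesh uses all the latest tools while Gilfoyle has a minimalist approach. Technical topics include CI/CD pipelines, infrastructure as code, and monitoring systems.",
--         "database": "The conversation is about database technologies. Dinesh might be excited about NoSQL while Gilfoyle sticks with battle-tested relational DBs. Technical topics include sharding, transaction consistency, and query optimization.",
--         "quantum": "The conversation is about quantum computing. Dinesh is hyping possibilities while Gilfoyle is skeptical about practical applications. Technical topics include qubits, quantum algorithms, and decoherence challenges.",
--     }
--
--     # First check for direct topic matches
--     for key, context in tech_contexts.items():
--         if key == topic.lower():
--             return context
--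
--     # Then check for partial matches
--     for key, context in tech_contexts.items():
--         if key in topic.lower():
--             return context
--
--     # Return a generic context if no matches
--     return f"The conversation is about {topic}. Dinesh and Gilfoyle have opposing views on this, with Dinesh being more optimistic but insecure about his knowledge, while Gilfoyle is cynical but technically superior. They should incorporate specific technical details in their responses."
-- ===== SOURCE B (Python) =====
-- def _generate_topic_context(topic: str) -> str:
--     """Generate context for the conversation based on topic (single-pass version)"""
--     tech_contexts = {
--         "ai": "The conversation is about AI and machine learning. Dinesh probably overcomplicated a simple model, while Gilfoyle believes most AI is just if-statements with marketing. Technical topics include neural networks, training data quality, and the real cybersecurity implications.",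
--         "blockchain": "The conversation is about blockchain technology. Dinesh likely sees it as the future, while Gilfoyle has probably built his own cryptocurrency mining setup and has cynical views about crypto hype. Technical topics include consensus algorithms, mining inefficiencies, and blockchain security.",
--         "frontend": "The conversation is about frontend development. Dinesh probably prefers modern frameworks while Gilfoyle thinks most of it is bloated. Technical topics include JavaScript frameworks, rendering performance, and CSS architecture.",
--         "security": "The conversation is about cybersecurity. Gilfoyle is clearly the expert here but Dinesh thinks he knows something about it too. Technical topics include zero-day exploits, penetration testing, and security architecture flaws.",
--         "middleware": "The conversation is about middleware optimization. Dinesh thinks it's a game-changer while Gilfoyle sees it as unnecessary complexity. Technical topics include async processing, caching strategies, and system architecture.",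
--         "microservices": "The conversation is about microservices architecture. Dinesh loves the modularity while Gilfoyle thinks it's overcomplicated. Technical topics include service discovery, containerization, and API design.",
--         "kubernetes": "The conversation is about container orchestration with Kubernetes vs alternatives. Dinesh is excited about it while Gilfoyle thinks it's overkill. Technical topics include deployment strategies, service meshes, and configuration management.",
--         "serverless": "The conversation is about serverless computing. Dinesh thinks it's the future while Gilfoyle sees security holes everywhere. Technical topics include function scaling, cold starts, and vendor lock-in.",
--         "graphql": "The conversation is about GraphQL vs REST APIs. Dinesh loves the query flexibility while Gilfoyle is concerned about performance implications. Technical topics include schema design, caching strategies, and client implementation.",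
--         "cloud": "The conversation is about cloud infrastructure. Dinesh wants to go all-in while Gilfoyle prefers on-premise control. Technical topics include cost optimization, multi-cloud strategies, and security concerns.",
--         "devops": "The conversation is about DevOps practices. Dinesh uses all the latest tools while Gilfoyle has a minimalist approach. Technical topics include CI/CD pipelines, infrastructure as code, and monitoring systems.",
--         "database": "The conversation is about database technologies. Dinesh might be excited about NoSQL while Gilfoyle sticks with battle-tested relational DBs. Technical topics include sharding, transaction consistency, and query optimization.",
--         "quantum": "The conversation is about quantum computing. Dinesh is hyping possibilities while Gilfoyle is skeptical about practical applications. Technical topics include qubits, quantum algorithms, and decoherence challenges.",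
--     }
--
--     t = topic.lower()
--     partial = None
--     # One pass: an exact key match wins immediately; otherwise remember the
--     # first key that occurs as a substring of the topic.
--     for key, context in tech_contexts.items():
--         if key == t:
--             return context
--         if partial is None and key in t:
--             partial = context
--
--     if partial is not None:
--         return partial
--     return f"The conversation is about {topic}. Dinesh and Gilfoyle have opposing views on this, with Dinesh being more optimistic but insecure about his knowledge, while Gilfoyle is cynical but technically superior. They should incorporate specific technical details in their responses."
-- ===== Notes on version B (the rewrite author's own statement) =====
-- stated objective: simpler
-- what changed: B fuses A's two sequential scans of the context dict (exact-match pass, then substring pass) into a single loop that returns immediately on an exact match and remembers the first substring match in an accumulator, dropping the second loop.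
import Mathlib
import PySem

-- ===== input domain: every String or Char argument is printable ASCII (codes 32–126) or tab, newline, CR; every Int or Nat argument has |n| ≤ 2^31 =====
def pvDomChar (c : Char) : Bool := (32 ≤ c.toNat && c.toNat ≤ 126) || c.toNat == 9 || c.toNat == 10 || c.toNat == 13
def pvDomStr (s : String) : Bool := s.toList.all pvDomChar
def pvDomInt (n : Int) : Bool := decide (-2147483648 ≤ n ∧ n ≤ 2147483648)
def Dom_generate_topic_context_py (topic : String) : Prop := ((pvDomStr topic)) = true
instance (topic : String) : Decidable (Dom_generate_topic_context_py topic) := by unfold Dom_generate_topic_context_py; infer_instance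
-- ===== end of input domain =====

-- B fuses A's two sequential scans of the dict into a single pass (exact match returns
-- immediately, the first substring match is remembered); same return value everywhere.

-- the literal tech_contexts dict, in insertion order (shared data of both ports)
def techContexts : List (String × String) := [
  ("ai", "The conversation is about AI and machine learning. Dinesh probably overcomplicated a simple model, while Gilfoyle believes most AI is just if-statements with marketing. Technical topics include neural networks, training data quality, and the real cybersecurity implications."),
  ("blockchain", "The conversation is about blockchain technology. Dinesh likely sees it as the future, while Gilfoyle has probably built his own cryptocurrency mining setup and has cynical views about crypto hype. Technical topics include consensus algorithms, mining inefficiencies, and blockchain security."),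
  ("frontend", "The conversation is about frontend development. Dinesh probably prefers modern frameworks while Gilfoyle thinks most of it is bloated. Technical topics include JavaScript frameworks, rendering performance, and CSS architecture."),
  ("security", "The conversation is about cybersecurity. Gilfoyle is clearly the expert here but Dinesh thinks he knows something about it too. Technical topics include zero-day exploits, penetration testing, and security architecture flaws."),
  ("middleware", "The conversation is about middleware optimization. Dinesh thinks it's a game-changer while Gilfoyle sees it as unnecessary complexity. Technical topics include async processing, caching strategies, and system architecture."),
  ("microservices", "The conversation is about microservices architecture. Dinesh loves the modularity while Gilfoyle thinks it's overcomplicated. Technical topics include service discovery, containerization, and API design."),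
  ("kubernetes", "The conversation is about container orchestration with Kubernetes vs alternatives. Dinesh is excited about it while Gilfoyle thinks it's overkill. Technical topics include deployment strategies, service meshes, and configuration management."),
  ("serverless", "The conversation is about serverless computing. Dinesh thinks it's the future while Gilfoyle sees security holes everywhere. Technical topics include function scaling, cold starts, and vendor lock-in."),
  ("graphql", "The conversation is about GraphQL vs REST APIs. Dinesh loves the query flexibility while Gilfoyle is concerned about performance implications. Technical topics include schema design, caching strategies, and client implementation."),
  ("cloud", "The conversation is about cloud infrastructure. Dinesh wants to go all-in while Gilfoyle prefers on-premise control. Technical topics include cost optimization, multi-cloud strategies, and security concerns."),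
  ("devops", "The conversation is about DevOps practices. Dinesh uses all the latest tools while Gilfoyle has a minimalist approach. Technical topics include CI/CD pipelines, infrastructure as code, and monitoring systems."),
  ("database", "The conversation is about database technologies. Dinesh might be excited about NoSQL while Gilfoyle sticks with battle-tested relational DBs. Technical topics include sharding, transaction consistency, and query optimization."),
  ("quantum", "The conversation is about quantum computing. Dinesh is hyping possibilities while Gilfoyle is skeptical about practical applications. Technical topics include qubits, quantum algorithms, and decoherence challenges.")]

-- the generic fallback f-string (shared literal text of both Pythons)
def genericContext (topic : String) : String :=
  "The conversation is about " ++ topic ++ ". Dinesh and Gilfoyle have opposing views on this, with Dinesh being more optimistic but insecure about his knowledge, while Gilfoyle is cynical but technically superior. They should incorporate specific technical details in their responses."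

-- ===== PORT A =====
-- A's first loop: 'if key == topic.lower(): return context'
def firstExact (t : String) : List (String × String) → Option String
  | [] => none
  | (k, c) :: rest => if k == t then some c else firstExact t rest

-- A's second loop: 'if key in topic.lower(): return context'
def firstSub (t : String) : List (String × String) → Option String
  | [] => none
  | (k, c) :: rest => if PySem.Str.isIn k t then some c else firstSub t rest

def generate_topic_context_py (topic : String) : String :=
  match firstExact (PySem.Str.lower topic) techContexts with
  | some c => c
  | none =>
    match firstSub (PySem.Str.lower topic) techContexts with
    | some c => c
    | none => genericContext topic

-- ===== PORT B =====
-- B's single loop: return on exact match, remember the first substring match in `partial`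
def scanOnce (t : String) (partial_ : Option String) : List (String × String) → Option String
  | [] => partial_
  | (k, c) :: rest =>
    if k == t then some c
    else scanOnce t (if partial_.isNone && PySem.Str.isIn k t then some c else partial_) rest

def generate_topic_context_py_alt (topic : String) : String :=
  match scanOnce (PySem.Str.lower topic) none techContexts with
  | some c => c
  | none => genericContext topic

-- ===== PRECONDITION & SPEC =====
def Spec_generate_topic_context_py (topic : String) (out : String) : Prop := out = generate_topic_context_py_alt topic
instance (topic : String) (out : String) : Decidable (Spec_generate_topic_context_py topic out) := by unfold Spec_generate_topic_context_py; infer_instance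

-- ===== CLAIM (what is proved, stated in full; the proofs are below) =====
def Claim_equal_generate_topic_context_py : Prop := ∀ (topic : String), Dom_generate_topic_context_py topic → Spec_generate_topic_context_py topic (generate_topic_context_py topic)

-- ===== LEMMAS AND PROOFS =====

-- loop fusion: one pass with a remembered partial match = exact pass, then pending partial, then substring pass
theorem scanOnce_eq (t : String) :
    ∀ (L : List (String × String)) (p : Option String),
      scanOnce t p L =
        match firstExact t L with
        | some c => some c
        | none => match p with
                  | some c => some c
                  | none => firstSub t L := by
  intro L
  induction L with
  | nil => intro p; cases p <;> simp [scanOnce, firstExact, firstSub]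
  | cons hd rest ih =>
    intro p
    obtain ⟨k, c⟩ := hd
    by_cases hk : k == t
    · simp [scanOnce, firstExact, hk]
    · simp only [scanOnce, firstExact, firstSub, hk, ih]
      cases p <;> cases hin : PySem.Str.isIn k t <;> simp [Option.isNone]

-- ===== VERDICT (by name: the statement is the Claim_ definition above) =====
theorem generate_topic_context_py_spec : Claim_equal_generate_topic_context_py := by
  intro topic _
  unfold Spec_generate_topic_context_py generate_topic_context_py generate_topic_context_py_alt
  rw [scanOnce_eq]
  cases firstExact (PySem.Str.lower topic) techContexts <;>
    cases firstSub (PySem.Str.lower topic) techContexts <;> simp
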